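-- pv_equiv track=rewrite | github.com/NikolaPavlov/HackBulgaria | week01_01/p15_hackNumbers.py | oddNumberOfOnesCheck
-- ===== SOURCE A (Python) =====
-- def oddNumberOfOnesCheck(num):
--     numInBinary = bin(num)
--     numOfOnes = 0
--     for digit in numInBinary:
--         if (digit == '1'):
--             numOfOnes += 1
--     if (numOfOnes % 2 == 1):
--         return True
--     else:
--         return False
-- ===== SOURCE B (Python) =====
-- def oddNumberOfOnesCheck(num):
--     # Kernighan bit-clearing loop: iterates once per set bit of abs(num)
--     # instead of scanning every character of bin(num).
--     n = abs(num)
--     count = 0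
--     while n:
--         n &= n - 1
--         count += 1
--     return count % 2 == 1
-- ===== Notes on version B (the rewrite author's own statement) =====
-- stated objective: faster
-- what changed: Replaces building the binary string with bin() and scanning every character for '1' by Brian Kernighan's n &= n-1 bit-clearing loop on abs(num), which iterates only once per set bit and tests the count's parity.
import Mathlib
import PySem

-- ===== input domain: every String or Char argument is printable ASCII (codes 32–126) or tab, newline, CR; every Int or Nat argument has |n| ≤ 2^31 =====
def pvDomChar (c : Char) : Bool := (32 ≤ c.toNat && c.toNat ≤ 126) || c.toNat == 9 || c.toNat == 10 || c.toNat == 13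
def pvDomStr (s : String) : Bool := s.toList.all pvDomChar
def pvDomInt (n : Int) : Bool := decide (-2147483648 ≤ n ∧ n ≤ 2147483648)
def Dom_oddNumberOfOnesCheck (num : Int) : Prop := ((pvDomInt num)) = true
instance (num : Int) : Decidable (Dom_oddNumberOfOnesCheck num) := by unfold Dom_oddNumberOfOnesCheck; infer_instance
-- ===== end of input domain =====

-- B replaces A's bin()-string scan by Brian Kernighan's bit-clearing loop on abs(num) (faster: touches only the set bits).


-- ===== PORT A =====
-- bin(num) → PySem.Int.pyBin (exact); the for-loop over the string's characters is the foldl.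
def oddNumberOfOnesCheck (num : Int) : Bool :=
  let numInBinary := PySem.Int.pyBin num
  let numOfOnes : Int :=
    numInBinary.toList.foldl (fun acc digit => if digit = '1' then acc + 1 else acc) 0
  if numOfOnes % 2 = 1 then true else false

-- ===== PORT B =====
-- the while-loop 'while n: n &= n-1; count += 1' of Source B; n = abs(num) is nonnegative, kept as Nat.
def kernCount (n : Nat) : Nat :=
  if h : n = 0 then 0
  else kernCount (n &&& (n - 1)) + 1
termination_by n
decreasing_by
  have h1 : n &&& (n - 1) ≤ n - 1 := Nat.and_le_right
  omega

def oddNumberOfOnesCheck_alt (num : Int) : Bool :=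
  decide (kernCount num.natAbs % 2 = 1)

-- ===== PRECONDITION & SPEC =====
def Spec_oddNumberOfOnesCheck (num : Int) (out : Bool) : Prop := out = oddNumberOfOnesCheck_alt num
instance (num : Int) (out : Bool) : Decidable (Spec_oddNumberOfOnesCheck num out) := by unfold Spec_oddNumberOfOnesCheck; infer_instance

-- ===== CLAIM (what is proved, stated in full; the proofs are below) =====
def Claim_equal_oddNumberOfOnesCheck : Prop := ∀ (num : Int), Dom_oddNumberOfOnesCheck num → Spec_oddNumberOfOnesCheck num (oddNumberOfOnesCheck num)

-- ===== LEMMAS AND PROOFS =====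

/-- Reference popcount used to relate both ports. -/
def popc (n : Nat) : Nat :=
  if n = 0 then 0 else n % 2 + popc (n / 2)
termination_by n
decreasing_by omega

theorem popc_zero : popc 0 = 0 := by simp [popc]

theorem popc_pos (n : Nat) (h : n ≠ 0) : popc n = n % 2 + popc (n / 2) := by
  conv_lhs => rw [popc]
  rw [if_neg h]

theorem kernCount_zero : kernCount 0 = 0 := by simp [kernCount]

theorem kernCount_pos (n : Nat) (h : n ≠ 0) :
    kernCount n = kernCount (n &&& (n - 1)) + 1 := by
  conv_lhs => rw [kernCount]
  rw [dif_neg h]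

theorem land_pred_of_odd (n : Nat) (h : n % 2 = 1) : n &&& (n - 1) = n - 1 := by
  obtain ⟨m, rfl⟩ : ∃ m, n = 2 * m + 1 := ⟨n / 2, by omega⟩
  have h2 : 2 * m = Nat.bit false m := by simp [Nat.bit]
  calc (2 * m + 1) &&& (2 * m + 1 - 1)
      = Nat.bit true m &&& Nat.bit false m := by rw [← h2]; rfl
    _ = Nat.bit false m := by rw [Nat.land_bit]; simp
    _ = 2 * m + 1 - 1 := by rw [← h2]; omega

theorem land_pred_two_mul (k : Nat) (h : 0 < k) :
    (2 * k) &&& (2 * k - 1) = 2 * (k &&& (k - 1)) := by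
  have h1 : 2 * k = Nat.bit false k := by simp [Nat.bit]
  have h2 : 2 * k - 1 = Nat.bit true (k - 1) := by simp [Nat.bit]; omega
  calc (2 * k) &&& (2 * k - 1)
      = Nat.bit false k &&& Nat.bit true (k - 1) := by rw [← h1, ← h2]
    _ = Nat.bit false (k &&& (k - 1)) := by rw [Nat.land_bit]; simp
    _ = 2 * (k &&& (k - 1)) := by simp [Nat.bit]

theorem land_pred_lt (n : Nat) (h : n ≠ 0) : n &&& (n - 1) < n := by
  have := Nat.and_le_right (n := n) (m := n - 1)
  omega

theorem popc_two_mul (m : Nat) : popc (2 * m) = popc m := by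
  by_cases hm : m = 0
  · subst hm; simp
  · rw [popc_pos (2 * m) (by omega)]
    have e1 : 2 * m % 2 = 0 := by omega
    have e2 : 2 * m / 2 = m := by omega
    rw [e1, e2]; omega

theorem kernCount_two_mul (m : Nat) : kernCount (2 * m) = kernCount m := by
  induction m using Nat.strong_induction_on with
  | _ m ih =>
    by_cases hm : m = 0
    · subst hm; simp
    · rw [kernCount_pos (2 * m) (by omega), land_pred_two_mul m (by omega),
          ih _ (land_pred_lt m hm), ← kernCount_pos m hm]

theorem kernCount_eq_popc (n : Nat) : kernCount n = popc n := by
  induction n using Nat.strong_induction_on with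
  | _ n ih =>
    by_cases hn : n = 0
    · subst hn; rw [kernCount_zero, popc_zero]
    · rcases Nat.mod_two_eq_zero_or_one n with he | ho
      · obtain ⟨m, rfl⟩ : ∃ m, n = 2 * m := ⟨n / 2, by omega⟩
        rw [kernCount_two_mul, ih m (by omega), popc_two_mul]
      · rw [kernCount_pos n hn, land_pred_of_odd n ho, ih (n - 1) (by omega)]
        have e : popc (n - 1) = popc (n / 2) := by
          by_cases h0 : n - 1 = 0
          · have hn1 : n = 1 := by omega
            subst hn1; rw [h0, popc_zero]
          · rw [popc_pos (n - 1) h0]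
            have e1 : (n - 1) % 2 = 0 := by omega
            have e2 : (n - 1) / 2 = n / 2 := by omega
            rw [e1, e2]; omega
        rw [e, popc_pos n hn, ho]; omega

/-- Character count of '1' in a list. -/
def cnt1 (l : List Char) : Nat := l.count '1'

theorem foldl_cnt1 (l : List Char) (acc : Int) :
    l.foldl (fun acc digit => if digit = '1' then acc + 1 else acc) acc
      = acc + (cnt1 l : Int) := by
  induction l generalizing acc with
  | nil => simp [cnt1]
  | cons c cs ih =>
    by_cases hc : c = '1'
    · subst hc
      simp [List.foldl, ih, cnt1]
      ring
    · simp [List.foldl, hc, ih, cnt1]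

theorem cnt1_digitChar_cons (n : Nat) (ds : List Char) :
    cnt1 ((n % 2).digitChar :: ds) = n % 2 + cnt1 ds := by
  rcases Nat.mod_two_eq_zero_or_one n with h | h
  · simp [h, cnt1, Nat.digitChar]
  · simp [h, cnt1, Nat.digitChar]
    omega

theorem cnt1_toDigitsCore (fuel n : Nat) (ds : List Char) (h : n < fuel) :
    cnt1 (Nat.toDigitsCore 2 fuel n ds) = popc n + cnt1 ds := by
  induction fuel generalizing n ds with
  | zero => omega
  | succ fuel ih =>
    rw [Nat.toDigitsCore]
    by_cases h2 : n / 2 = 0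
    · simp only [h2, if_pos]
      rw [cnt1_digitChar_cons]
      by_cases hn : n = 0
      · subst hn; rw [popc_zero]
      · rw [popc_pos n hn, h2, popc_zero]; omega
    · rw [if_neg h2, ih (n / 2) _ (by omega), cnt1_digitChar_cons,
          popc_pos n (by omega)]
      omega

theorem cnt1_toDigits (m : Nat) : cnt1 (Nat.toDigits 2 m) = popc m := by
  rw [Nat.toDigits, cnt1_toDigitsCore (m + 1) m [] (by omega)]
  simp [cnt1]

theorem cnt1_toBinChars0b (num : Int) :
    cnt1 (PySem.Int.toBinChars0b num) = popc num.natAbs := by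
  unfold PySem.Int.toBinChars0b
  split
  · next hneg =>
    rw [show cnt1 ('-' :: '0' :: 'b' :: Nat.toDigits 2 num.natAbs)
          = cnt1 (Nat.toDigits 2 num.natAbs) by simp [cnt1]]
    exact cnt1_toDigits _
  · next hpos =>
    rw [show cnt1 ('0' :: 'b' :: Nat.toDigits 2 num.toNat)
          = cnt1 (Nat.toDigits 2 num.toNat) by simp [cnt1]]
    rw [cnt1_toDigits]
    have e : num.toNat = num.natAbs := by omega
    rw [e]

-- ===== VERDICT (by name: the statement is the Claim_ definition above) =====
theorem oddNumberOfOnesCheck_spec : Claim_equal_oddNumberOfOnesCheck := by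
  intro num _
  show (if ((PySem.Int.pyBin num).toList.foldl
            (fun acc digit => if digit = '1' then acc + 1 else acc) (0 : Int)) % 2 = 1
        then true else false)
      = decide (kernCount num.natAbs % 2 = 1)
  rw [PySem.Int.toList_pyBin, foldl_cnt1, cnt1_toBinChars0b, kernCount_eq_popc]
  rcases Nat.mod_two_eq_zero_or_one (popc num.natAbs) with h | h
  · have h' : ¬ ((0 + (popc num.natAbs : Int)) % 2 = 1) := by omega
    rw [if_neg h']; simp [h]
  · have h' : (0 + (popc num.natAbs : Int)) % 2 = 1 := by omega
    rw [if_pos h']; simp [h]
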